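-- pv_equiv track=rewrite | github.com/SergeyChesnokov/GB_python_continue | seminar_6_modules/chess.py | checkmate
-- ===== SOURCE A (Python) =====
-- def checkmate(qw_pos: list) -> bool:
--     qw_row = [i[0] for i in qw_pos] # сформирован список 1-х координат ферзей
--     qw_col = [i[1] for i in qw_pos] # сформирован список 2-х координат ферзей
--     qw_main_diag = [i[0] - i[1] for i in qw_pos]
--     qw_scnd_diag = [i[0] + i[1] for i in qw_pos]
--     for i in range(8):
--         if any([
--             qw_row.count(qw_row[i]) > 1,
--             qw_col.count(qw_col[i]) > 1,
--             qw_main_diag.count(qw_main_diag[i]) > 1,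
--             qw_scnd_diag.count(qw_scnd_diag[i]) > 1
--         ]):
--             return False
--         else:
--             return True
-- ===== SOURCE B (Python) =====
-- def checkmate(qw_pos: list) -> bool:
--     for k, q in enumerate(qw_pos):
--         for p in qw_pos[k + 1:]:
--             if (q[0] == p[0] or q[1] == p[1]
--                     or q[0] - q[1] == p[0] - p[1]
--                     or q[0] + q[1] == p[0] + p[1]):
--                 return False
--     return True
-- ===== Notes on version B (the rewrite author's own statement) =====
-- stated objective: simpler
-- what changed: B replaces A's four comprehension-built coordinate lists plus .count scans (whose loop returns after checking only the first queen) with a direct all-pairs comparison loop that actually checks every pair of queens.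
-- intended difference: On boards where the first queen attacks no other queen but two later queens attack each other, A returns True (its loop unconditionally returns on i=0, so only queen 0 is ever checked) while B returns False, which is the intended answer for a mutual-threat check. — e.g. on checkmate([[0, 0], [1, 2], [1, 5]]): A returns true, B returns false
import Mathlib
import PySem

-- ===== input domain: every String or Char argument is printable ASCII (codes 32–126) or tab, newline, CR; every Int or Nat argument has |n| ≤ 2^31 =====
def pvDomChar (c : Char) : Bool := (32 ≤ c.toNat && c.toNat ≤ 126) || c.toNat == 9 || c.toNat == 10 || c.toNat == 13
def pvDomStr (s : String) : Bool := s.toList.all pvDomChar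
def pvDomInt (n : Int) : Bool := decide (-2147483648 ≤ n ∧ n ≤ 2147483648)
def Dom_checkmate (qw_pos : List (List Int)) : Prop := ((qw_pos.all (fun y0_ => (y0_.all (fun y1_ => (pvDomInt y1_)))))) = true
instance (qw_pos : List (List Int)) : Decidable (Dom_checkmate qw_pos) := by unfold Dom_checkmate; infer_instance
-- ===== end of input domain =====

-- B replaces A's count-on-first-queen check (A's loop returns in both branches of its first iteration) with a plain all-pairs threat scan; proved equal outside D_checkmate below.


-- ===== PORT A =====
-- Literal port of A. A's `for i in range(8)` returns in BOTH branches of its first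
-- iteration, so exactly the i = 0 body runs; the port writes that one iteration.
-- Python's i[0]/i[1] raise IndexError on short inner lists (excluded by Pre_);
-- ported as getD, exact under Pre_.
def checkmate (qw_pos : List (List Int)) : Bool :=
  let qw_row := qw_pos.map (fun i => i.getD 0 0)
  let qw_col := qw_pos.map (fun i => i.getD 1 0)
  let qw_main_diag := qw_pos.map (fun i => i.getD 0 0 - i.getD 1 0)
  let qw_scnd_diag := qw_pos.map (fun i => i.getD 0 0 + i.getD 1 0)
  if qw_row.count (qw_row.getD 0 0) > 1 ∨ qw_col.count (qw_col.getD 0 0) > 1 ∨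
     qw_main_diag.count (qw_main_diag.getD 0 0) > 1 ∨ qw_scnd_diag.count (qw_scnd_diag.getD 0 0) > 1
  then false else true

-- ===== PORT B =====
-- does queen q threaten queen p (same row / column / either diagonal)?
def attacksB (q p : List Int) : Bool :=
  q.getD 0 0 == p.getD 0 0 || q.getD 1 0 == p.getD 1 0 ||
  q.getD 0 0 - q.getD 1 0 == p.getD 0 0 - p.getD 1 0 ||
  q.getD 0 0 + q.getD 1 0 == p.getD 0 0 + p.getD 1 0

-- Source B: for each queen, scan the queens after it; return False on the first threat.
def checkmate_alt : List (List Int) → Bool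
  | [] => true
  | q :: rest => if rest.any (fun p => attacksB q p) then false else checkmate_alt rest

-- ===== PRECONDITION & SPEC =====
-- Pre_ excludes exactly the inputs on which Python A raises IndexError:
-- the empty list (qw_row[0]) and boards with an inner list of length < 2 (i[1]).
def Pre_checkmate (qw_pos : List (List Int)) : Prop :=
  qw_pos ≠ [] ∧ ∀ q ∈ qw_pos, 2 ≤ q.length
instance (qw_pos : List (List Int)) : Decidable (Pre_checkmate qw_pos) := by
  unfold Pre_checkmate; infer_instance

def pvWitness_checkmate : List (List Int) := [[0, 0], [1, 2]]

-- On boards where the first queen attacks no other queen but two later queens attack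
-- each other, A returns True (its loop unconditionally returns on i = 0, so only queen 0
-- is ever checked) while B returns False, the intended answer for a mutual-threat check.
-- input-level threat relation: with a = row difference and b = column difference,
-- the queens share a row, column or diagonal iff a^3 * b = a * b^3 (i.e. a*b*(a-b)*(a+b) = 0)
def Threat (p q : List Int) : Prop :=
  let a := p.headI - q.headI
  let b := p.tail.headI - q.tail.headI
  a ^ 3 * b = a * b ^ 3

def D_checkmate (qw_pos : List (List Int)) : Prop :=
  ¬ qw_pos.tail.Pairwise (¬ Threat · ·) ∧ ∀ p ∈ qw_pos.tail, ¬ Threat qw_pos.headI p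
instance (qw_pos : List (List Int)) : Decidable (D_checkmate qw_pos) := by
  unfold D_checkmate Threat; infer_instance

def Spec_checkmate (qw_pos : List (List Int)) (out : Bool) : Prop :=
  ¬ D_checkmate qw_pos → out = checkmate_alt qw_pos
instance (qw_pos : List (List Int)) (out : Bool) : Decidable (Spec_checkmate qw_pos out) := by
  unfold Spec_checkmate; infer_instance

def pvDiffWitness_checkmate : List (List Int) := [[0, 0], [1, 2], [1, 5]]
def pvDiffWitnessOut_checkmate : Bool × Bool := (true, false)

-- ===== CLAIM (what is proved, stated in full; the proofs are below) =====
def Claim_unchanged_checkmate : Prop := ∀ (qw_pos : List (List Int)), Dom_checkmate qw_pos → Pre_checkmate qw_pos → Spec_checkmate qw_pos (checkmate qw_pos)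
def Claim_changed_checkmate : Prop := Dom_checkmate (pvDiffWitness_checkmate) ∧ Pre_checkmate (pvDiffWitness_checkmate) ∧ D_checkmate (pvDiffWitness_checkmate) ∧ checkmate (pvDiffWitness_checkmate) = pvDiffWitnessOut_checkmate.1 ∧ checkmate_alt (pvDiffWitness_checkmate) = pvDiffWitnessOut_checkmate.2 ∧ pvDiffWitnessOut_checkmate.1 ≠ pvDiffWitnessOut_checkmate.2
def Claim_exact_checkmate : Prop := ∀ (qw_pos : List (List Int)), Dom_checkmate qw_pos → Pre_checkmate qw_pos → D_checkmate qw_pos → checkmate qw_pos ≠ checkmate_alt qw_pos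

-- ===== LEMMAS AND PROOFS =====

-- count of the first queen's coordinate in the whole coordinate list exceeds 1
-- exactly when a later queen shares that coordinate
lemma count_gt (f : List Int → Int) (q0 : List Int) (rest : List (List Int)) :
    1 < (((q0 :: rest).map f).count (((q0 :: rest).map f).getD 0 0)) ↔ ∃ p ∈ rest, f p = f q0 := by
  simp [List.map_cons, List.count_cons_self, List.count_pos_iff, List.mem_map, eq_comm]

-- A on a nonempty board is exactly "queen 0 threatens nobody else"
lemma checkmate_cons (q0 : List Int) (rest : List (List Int)) :
    checkmate (q0 :: rest) = !(rest.any (fun p => attacksB q0 p)) := by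
  unfold checkmate
  simp only [count_gt]
  split_ifs with hif
  · symm
    rw [Bool.not_eq_false', List.any_eq_true]
    obtain ⟨p, hp, he⟩ | ⟨p, hp, he⟩ | ⟨p, hp, he⟩ | ⟨p, hp, he⟩ := hif <;>
      exact ⟨p, hp, by simp only [attacksB, Bool.or_eq_true, beq_iff_eq]; omega⟩
  · symm
    rw [Bool.not_eq_true', List.any_eq_false]
    push_neg at hif
    obtain ⟨h1, h2, h3, h4⟩ := hif
    intro p hp hc
    simp only [attacksB, Bool.or_eq_true, beq_iff_eq] at hc
    have e1 := h1 p hp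
    have e2 := h2 p hp
    have e3 := h3 p hp
    have e4 := h4 p hp
    rcases hc with ((e | e) | e) | e <;> omega

-- B returns true exactly on pairwise non-threatening boards
lemma alt_true_iff (xs : List (List Int)) :
    checkmate_alt xs = true ↔ xs.Pairwise (fun p q => attacksB p q = false) := by
  induction xs with
  | nil => simp [checkmate_alt]
  | cons q rest ih =>
    rw [List.pairwise_cons, ← ih]
    show (if rest.any (fun p => attacksB q p) then false else checkmate_alt rest) = true ↔ _
    cases h : rest.any (fun p => attacksB q p) with
    | true =>
      rw [if_pos rfl]
      rw [List.any_eq_true] at h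
      obtain ⟨p, hp, hatt⟩ := h
      constructor
      · intro hc; exact absurd hc (by simp)
      · rintro ⟨hall, -⟩
        rw [hall p hp] at hatt
        exact absurd hatt (by simp)
    | false =>
      rw [if_neg (by simp)]
      rw [List.any_eq_false] at h
      constructor
      · intro ht
        refine ⟨fun p hp => ?_, ht⟩
        have := h p hp
        cases hx : attacksB q p
        · rfl
        · exact absurd hx this
      · rintro ⟨-, ht⟩; exact ht

lemma any_false_of_all (q0 : List Int) (rest : List (List Int))
    (h : ∀ q ∈ rest, attacksB q0 q = false) :
    rest.any (fun p => attacksB q0 p) = false := by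
  rw [List.any_eq_false]
  intro p hp hc
  rw [h p hp] at hc
  exact absurd hc (by simp)

lemma headI_eq_getD (q : List Int) : q.headI = q.getD 0 0 := by cases q <;> rfl

lemma tail_headI_eq_getD (q : List Int) : q.tail.headI = q.getD 1 0 := by
  cases q with
  | nil => rfl
  | cons a t => cases t <;> rfl

lemma cubic_eq_iff (a b : Int) : a ^ 3 * b = a * b ^ 3 ↔ (a = 0 ∨ b = 0 ∨ a = b ∨ a = -b) := by
  constructor
  · intro h
    have h0 : a * b * ((a - b) * (a + b)) = 0 := by linear_combination h
    rcases mul_eq_zero.mp h0 with hab | hd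
    · rcases mul_eq_zero.mp hab with ha | hb
      · exact Or.inl ha
      · exact Or.inr (Or.inl hb)
    · rcases mul_eq_zero.mp hd with hm | hp
      · exact Or.inr (Or.inr (Or.inl (sub_eq_zero.mp hm)))
      · exact Or.inr (Or.inr (Or.inr (eq_neg_of_add_eq_zero_left hp)))
  · rintro (h | h | h | h) <;> subst h <;> ring

lemma attacksB_iff_threat (p q : List Int) : attacksB p q = true ↔ Threat p q := by
  unfold Threat
  rw [headI_eq_getD p, headI_eq_getD q, tail_headI_eq_getD p, tail_headI_eq_getD q,
    cubic_eq_iff]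
  simp only [attacksB, Bool.or_eq_true, beq_iff_eq]
  generalize p.getD 0 0 = rp
  generalize p.getD 1 0 = cp
  generalize q.getD 0 0 = rq
  generalize q.getD 1 0 = cq
  constructor <;> intro h <;> omega

lemma attacksB_false_iff (p q : List Int) : attacksB p q = false ↔ ¬ Threat p q := by
  rw [← attacksB_iff_threat, Bool.not_eq_true, Bool.eq_false_iff, ne_eq, Bool.not_eq_true]

-- ===== VERDICT (by name: the statement is the Claim_ definition above) =====
theorem checkmate_spec : Claim_unchanged_checkmate := by
  intro qw _hdom hpre hnd
  obtain ⟨hne, -⟩ := hpre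
  cases qw with
  | nil => exact absurd rfl hne
  | cons q0 rest =>
    rw [checkmate_cons]
    cases h : rest.any (fun p => attacksB q0 p) with
    | true => simp [checkmate_alt, h]
    | false =>
      have hall : ∀ p ∈ rest, attacksB q0 p = false := by
        rw [List.any_eq_false] at h
        intro p hp
        have := h p hp
        cases hx : attacksB q0 p
        · rfl
        · exact absurd hx this
      have hP : rest.Pairwise (fun p q => attacksB p q = false) := by
        by_contra hc
        refine hnd ⟨?_, ?_⟩
        · simp only [List.tail_cons]
          intro hpw
          exact hc (hpw.imp (fun {a b} hab => (attacksB_false_iff a b).mpr hab))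
        · simpa [attacksB_false_iff] using fun p hp => (attacksB_false_iff q0 p).mp (hall p hp)
      simp only [Bool.not_false]
      symm
      rw [alt_true_iff, List.pairwise_cons]
      exact ⟨hall, hP⟩

theorem checkmate_changed : Claim_changed_checkmate := by
  unfold Claim_changed_checkmate; decide

theorem checkmate_tight : Claim_exact_checkmate := by
  intro qw _hdom _hpre hd
  obtain ⟨hnp, hsafe⟩ := hd
  cases qw with
  | nil => exact absurd List.Pairwise.nil hnp
  | cons q0 rest =>
    simp only [List.tail_cons, List.headI_cons] at hsafe hnp
    have hsafe' : ∀ q ∈ rest, attacksB q0 q = false :=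
      fun q hq => (attacksB_false_iff q0 q).mpr (hsafe q hq)
    have hany := any_false_of_all q0 rest hsafe'
    rw [checkmate_cons, hany]
    have halt : checkmate_alt (q0 :: rest) = false := by
      show (if rest.any (fun p => attacksB q0 p) then false else checkmate_alt rest) = false
      rw [hany, if_neg (by simp)]
      cases hx : checkmate_alt rest
      · rfl
      · refine absurd ?_ hnp
        exact ((alt_true_iff rest).mp hx).imp (fun {a b} hab => (attacksB_false_iff a b).mp hab)
    rw [halt]
    simp
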